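-- pv_equiv track=rewrite | github.com/Benjamin7991/My-Code-Wars-Solutions | 6KYU/Proof_Read.py | proofread
-- ===== SOURCE A (Python) =====
-- def proofread(string):
--
--     result = []
--     string = string.lower().split()
--
--
--     for word in string:
--         if 'ie' in word:
--             new_word = word.replace('ie', 'ei')
--             result.append(new_word)
--         else:
--             result.append(word)
--
--     test = ' '.join(result)
--     test = test.split('.')
--
--     final = []
--     for item in test:
--         item = item.strip().capitalize()
--         final.append(item)
--     return '. '.join(final).strip()
-- ===== SOURCE B (Python) =====
-- def proofread(string):
--     sentences = []
--     for sentence in string.lower().split('.'):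
--         words = sentence.replace('ie', 'ei').split()
--         sentences.append(' '.join(words).capitalize())
--     return '. '.join(sentences).strip()
-- ===== Notes on version B (the rewrite author's own statement) =====
-- stated objective: alternative
-- what changed: B inverts A's phase order: it splits the lowered string into sentences at the period separator FIRST and then, per sentence, does one whole-sentence ie-to-ei replacement plus whitespace normalization and capitalization, instead of A's flat word-by-word pass (with a per-word membership test and per-word replacement) followed by a separate sentence pass over the re-joined string.
import Mathlib
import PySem

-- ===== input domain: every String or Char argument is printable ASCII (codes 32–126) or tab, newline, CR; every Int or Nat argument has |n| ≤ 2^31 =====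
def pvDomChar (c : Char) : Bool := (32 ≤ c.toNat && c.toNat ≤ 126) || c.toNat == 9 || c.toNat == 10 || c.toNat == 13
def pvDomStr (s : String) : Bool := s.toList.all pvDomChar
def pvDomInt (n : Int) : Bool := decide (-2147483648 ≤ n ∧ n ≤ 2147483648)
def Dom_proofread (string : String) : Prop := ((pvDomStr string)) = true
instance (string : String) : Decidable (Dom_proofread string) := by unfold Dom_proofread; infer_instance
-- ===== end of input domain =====

-- B inverts A's phase order: it splits into '.'-sentences FIRST and then normalizes/replaces
-- inside each sentence, instead of A's flat word pass followed by a separate sentence pass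
-- (objective: alternative decomposition, same cost).

-- str.capitalize() for the ASCII domain: first char uppercased, the rest lowercased
-- (hand-ported helper, shared by both ports; exact on the stated ASCII domain).
def pyCapitalize : List Char → List Char
  | [] => []
  | c :: t => PySem.Chars.upperChar c :: List.map PySem.Chars.lowerChar t

-- ===== PORT A =====
def proofread (string : String) : String :=
  -- string = string.lower().split()
  let ws : List (List Char) := PySem.Chars.split₀ (PySem.Chars.lower string.toList)
  -- for word in string: if 'ie' in word: append(word.replace('ie','ei')) else append(word)
  let result : List (List Char) := ws.foldl (fun result word =>
      if PySem.Chars.isIn ['i', 'e'] word then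
        result ++ [PySem.Chars.replace word ['i', 'e'] ['e', 'i']]
      else
        result ++ [word]) []
  -- test = ' '.join(result); test = test.split('.')
  let test : List Char := PySem.Chars.join [' '] result
  let parts : List (List Char) := PySem.Chars.splitOn test ['.']
  -- for item in test: final.append(item.strip().capitalize())
  let final : List (List Char) := parts.foldl (fun final item =>
      final ++ [pyCapitalize (PySem.Chars.strip item)]) []
  -- return '. '.join(final).strip()
  String.ofList (PySem.Chars.strip (PySem.Chars.join ['.', ' '] final))

-- ===== PORT B =====
def proofread_alt (string : String) : String :=
  -- for sentence in string.lower().split('.'):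
  let segs : List (List Char) := PySem.Chars.splitOn (PySem.Chars.lower string.toList) ['.']
  let sentences : List (List Char) := segs.foldl (fun acc sentence =>
      -- words = sentence.replace('ie', 'ei').split()
      let words : List (List Char) :=
        PySem.Chars.split₀ (PySem.Chars.replace sentence ['i', 'e'] ['e', 'i'])
      -- sentences.append(' '.join(words).capitalize())
      acc ++ [pyCapitalize (PySem.Chars.join [' '] words)]) []
  -- return '. '.join(sentences).strip()
  String.ofList (PySem.Chars.strip (PySem.Chars.join ['.', ' '] sentences))

-- ===== PRECONDITION & SPEC =====
def Spec_proofread (string : String) (out : String) : Prop := out = proofread_alt string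
instance (string : String) (out : String) : Decidable (Spec_proofread string out) := by unfold Spec_proofread; infer_instance

-- ===== CLAIM (what is proved, stated in full; the proofs are below) =====
def Claim_equal_proofread : Prop := ∀ (string : String), Dom_proofread string → Spec_proofread string (proofread string)

-- ===== LEMMAS AND PROOFS =====

-- u.replace('ie','ei') as a clean structural recursion
def repF : List Char → List Char
  | 'i' :: 'e' :: t => 'e' :: 'i' :: repF t
  | c :: t => c :: repF t
  | [] => []

lemma splitOnP_head (p : Char → Bool) (t : List Char) :
    ∃ ls, t.splitOnP p = t.takeWhile (fun a => !p a) :: ls := by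
  induction t with
  | nil => exact ⟨[], by simp⟩
  | cons c t ih =>
    by_cases h : p c
    · exact ⟨t.splitOnP p, by simp [h]⟩
    · obtain ⟨ls, hls⟩ := ih
      exact ⟨ls, by simp [h, hls]⟩

lemma repF_ie (t : List Char) : repF ('i' :: 'e' :: t) = 'e' :: 'i' :: repF t := rfl

lemma repF_cons_not {c : Char} {t : List Char} (h : ¬ ['i', 'e'] <+: (c :: t)) :
    repF (c :: t) = c :: repF t := by
  match c, t with
  | 'i', 'e' :: t' => exact absurd (by simp [List.cons_prefix_cons]) h
  | c, [] =>
    rw [repF.eq_def]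
    split
    · rename_i heq; cases heq
    · rename_i heq; cases heq; rfl
    · rename_i heq; cases heq
  | c, d :: t' =>
    rw [repF.eq_def]
    split
    · rename_i heq; injection heq with h1 h2; injection h2 with h3 h4
      subst h1; subst h3
      exact absurd (by simp [List.cons_prefix_cons]) h
    · rename_i heq; cases heq; rfl
    · rename_i heq; cases heq

lemma repF_ne_nil {x : List Char} (h : x ≠ []) : repF x ≠ [] := by
  match x with
  | c :: t =>
    by_cases hp : ['i', 'e'] <+: (c :: t)
    · obtain ⟨u, hu⟩ := hp
      cases hu
      simp [repF_ie]
    · simp [repF_cons_not hp]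

lemma repF_of_not_infix {w : List Char} (h : ¬ ['i', 'e'] <:+: w) : repF w = w := by
  induction w with
  | nil => rfl
  | cons c t ih =>
    have hp : ¬ ['i', 'e'] <+: (c :: t) := fun hp => h hp.isInfix
    rw [repF_cons_not hp, ih (fun hi => h (List.infix_cons hi))]

lemma splitOnP_repF (p : Char → Bool) (hi : p 'i' = false) (he : p 'e' = false) :
    ∀ u : List Char, (repF u).splitOnP p = (u.splitOnP p).map repF := by
  intro u
  induction u using repF.induct with
  | case3 => simp [show repF [] = [] from rfl]
  | case1 t ih =>
    rw [repF_ie]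
    obtain ⟨s0, ls, hls⟩ : ∃ s0 ls, t.splitOnP p = s0 :: ls := by
      obtain ⟨ls, hls⟩ := splitOnP_head p t
      exact ⟨_, _, hls⟩
    simp only [List.splitOnP_cons, hi, he, Bool.false_eq_true, if_false, ih, hls,
      List.map_cons, List.modifyHead_cons, repF_ie]
  | case2 c t hne ih =>
    have hp : ¬ ['i', 'e'] <+: (c :: t) := by
      intro hp
      rw [List.cons_prefix_cons] at hp
      obtain ⟨hc, hp⟩ := hp
      rcases t with _ | ⟨d, t'⟩
      · simp at hp
      · rw [List.cons_prefix_cons] at hp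
        exact hne t' hc.symm (by rw [← hp.1])
    rw [repF_cons_not hp]
    by_cases hpc : p c
    · simp [hpc, ih, show repF [] = [] from rfl]
    · obtain ⟨ls, hls⟩ := splitOnP_head p t
      have htw : ¬ ['i', 'e'] <+: (c :: t.takeWhile (fun a => !p a)) := by
        intro hx
        exact hp (List.cons_prefix_cons.mpr
          ⟨(List.cons_prefix_cons.mp hx).1,
           ((List.cons_prefix_cons.mp hx).2.trans (List.takeWhile_prefix _))⟩)
      simp only [List.splitOnP_cons, hpc, Bool.false_eq_true, if_false, ih, hls,
        List.map_cons, List.modifyHead_cons, repF_cons_not htw]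

lemma replace_go (fuel : Nat) : ∀ (l acc : List Char), l.length ≤ fuel →
    PySem.Chars.replace.go ['i','e'] ['e','i'] fuel l acc = acc.reverse ++ repF l := by
  induction fuel with
  | zero =>
    intro l acc h
    have : l = [] := List.length_eq_zero_iff.mp (Nat.le_zero.mp h)
    subst this
    simp [PySem.Chars.replace.go, show repF [] = [] from rfl]
  | succ n ih =>
    intro l acc h
    rcases l with _ | ⟨c, t⟩
    · simp [PySem.Chars.replace.go, show repF [] = [] from rfl]
    · rw [PySem.Chars.replace.go]
      by_cases hp : ['i','e'] <+: (c :: t)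
      · have hb : List.isPrefixOf ['i','e'] (c :: t) = true := List.isPrefixOf_iff_prefix.mpr hp
        obtain ⟨u, hu⟩ := hp
        cases hu
        simp only [List.append_eq, List.singleton_append] at h hb ⊢
        simp only [hb, if_true]
        have hd : List.drop (['i','e'] : List Char).length ('i' :: 'e' :: u) = u := rfl
        rw [hd, ih u _ (by simp at h; omega)]
        simp [repF_ie]
      · have hb : List.isPrefixOf ['i','e'] (c :: t) = false := by
          rw [Bool.eq_false_iff]
          intro hx
          exact hp (List.isPrefixOf_iff_prefix.mp hx)
        simp only [hb, Bool.false_eq_true, if_false]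
        rw [ih t _ (by simp at h; omega)]
        simp [repF_cons_not hp]

lemma replace_eq_repF (u : List Char) :
    PySem.Chars.replace u ['i', 'e'] ['e', 'i'] = repF u := by
  rw [PySem.Chars.replace]
  simp only [List.isEmpty_cons, Bool.false_eq_true, if_false]
  simpa using replace_go u.length u [] le_rfl

def Wwords (u : List Char) : List (List Char) :=
  (u.splitOnP PySem.Chars.isspace).filter (· ≠ [])

lemma splitOn_go (d : Char) (fuel : Nat) : ∀ l cur acc, l.length ≤ fuel →
    PySem.Chars.splitOn.go [d] fuel l cur acc =
      acc.reverse ++ ((l.splitOn d).modifyHead (cur.reverse ++ ·)) := by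
  induction fuel with
  | zero =>
    intro l cur acc h
    have : l = [] := List.length_eq_zero_iff.mp (Nat.le_zero.mp h)
    subst this
    simp [PySem.Chars.splitOn.go, List.splitOn]
  | succ n ih =>
    intro l cur acc h
    rcases l with _ | ⟨c, rest⟩
    · simp [PySem.Chars.splitOn.go, List.splitOn]
    · rw [PySem.Chars.splitOn.go]
      have hsp : (c :: rest).splitOn d = ((rest.splitOn d).modifyHead (c :: ·)) ∨
          (c = d ∧ (c :: rest).splitOn d = [] :: rest.splitOn d) := by
        by_cases hc : c = d
        · subst hc; right; exact ⟨rfl, by simp [List.splitOn, List.splitOnP_cons]⟩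
        · left
          simp [List.splitOn, List.splitOnP_cons, show (c == d) = false by simpa using hc]
      by_cases hc : c = d
      · subst hc
        have hb : List.isPrefixOf [c] (c :: rest) = true := by
          simp [List.isPrefixOf_iff_prefix, List.cons_prefix_cons]
        simp only [hb, if_true]
        have hdrop : List.drop ([c] : List Char).length (c :: rest) = rest := rfl
        rw [hdrop, ih _ _ _ (by simp at h; omega)]
        have hsp2 : (c :: rest).splitOn c = [] :: rest.splitOn c := by
          simp [List.splitOn, List.splitOnP_cons]
        rw [hsp2]
        cases hrs : rest.splitOn c <;> simp
      · have hb : List.isPrefixOf [d] (c :: rest) = false := by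
          rw [Bool.eq_false_iff]
          intro hx
          exact hc (List.cons_prefix_cons.mp (List.isPrefixOf_iff_prefix.mp hx)).1.symm
        simp only [hb, Bool.false_eq_true, if_false]
        rw [ih _ _ _ (by simp at h; omega)]
        rcases hsp with hsp | ⟨he, -⟩
        · rw [hsp]
          rw [List.modifyHead_modifyHead]
          cases rest.splitOn d <;> simp
        · exact absurd he hc

lemma splitOn_bridge (u : List Char) (d : Char) :
    PySem.Chars.splitOn u [d] = u.splitOn d := by
  rw [PySem.Chars.splitOn, splitOn_go d (u.length + 1) u [] [] (by omega)]
  cases h : u.splitOn d <;> simp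

lemma split₀_go (l : List Char) : ∀ cur acc,
    PySem.Chars.split₀.go l cur acc =
      acc.reverse ++
        (((l.splitOnP PySem.Chars.isspace).modifyHead (cur.reverse ++ ·)).filter (· ≠ [])) := by
  induction l with
  | nil =>
    intro cur acc
    rcases hc : cur with _ | ⟨a, b⟩ <;> simp [PySem.Chars.split₀.go, hc]
  | cons c rest ih =>
    intro cur acc
    rw [PySem.Chars.split₀.go]
    by_cases hs : PySem.Chars.isspace c
    · simp only [hs, if_true]
      by_cases hcur : cur = []
      · subst hcur
        simp only [List.isEmpty_nil, if_true, ih]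
        rw [List.splitOnP_cons, hs]
        simp only [if_true]
        congr 1
        cases rest.splitOnP PySem.Chars.isspace <;> simp
      · have : cur.isEmpty = false := by simpa [List.isEmpty_iff] using hcur
        simp only [this, Bool.false_eq_true, if_false, ih]
        rw [List.splitOnP_cons, hs]
        simp only [if_true, List.modifyHead_cons]
        rw [List.filter_cons_of_pos (by simpa using hcur)]
        simp only [List.append_assoc, List.reverse_cons, List.append_nil, List.cons_append,
          List.nil_append, List.append_cancel_left_eq, List.cons.injEq, true_and]
        congr 1
        cases rest.splitOnP PySem.Chars.isspace <;> simp
    · have hs' : PySem.Chars.isspace c = false := by simpa using hs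
      simp only [hs', Bool.false_eq_true, if_false, ih]
      rw [List.splitOnP_cons, hs']
      simp only [Bool.false_eq_true, if_false, List.modifyHead_modifyHead]
      congr 2
      cases rest.splitOnP PySem.Chars.isspace <;> simp

lemma split₀_bridge (u : List Char) : PySem.Chars.split₀ u = Wwords u := by
  rw [PySem.Chars.split₀, split₀_go, Wwords]
  cases h : u.splitOnP PySem.Chars.isspace <;> simp

def collapse : List Char → List Char
  | [] => []
  | c :: t =>
    if PySem.Chars.isspace c then ' ' :: collapse (t.dropWhile PySem.Chars.isspace)
    else c :: collapse t
termination_by u => u.length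
decreasing_by
  · simpa using Nat.lt_succ_of_le (List.length_dropWhile_le _ _)
  · simp

lemma isspace_dot : PySem.Chars.isspace '.' = false := by decide
lemma splitOnP_dot_dropWhile (t : List Char) :
    (t.dropWhile PySem.Chars.isspace).splitOnP (· == '.') =
      ((t.splitOnP (· == '.')).modifyHead (List.dropWhile PySem.Chars.isspace)) := by
  induction t with
  | nil => simp
  | cons a t ih =>
    by_cases hs : PySem.Chars.isspace a
    · have had : (a == '.') = false := by
        rw [beq_eq_false_iff_ne]; rintro rfl; simp [isspace_dot] at hs
      rw [List.dropWhile_cons_of_pos hs, ih, List.splitOnP_cons, had]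
      simp only [Bool.false_eq_true, if_false, List.modifyHead_modifyHead]
      congr 1
      funext x
      simp [List.dropWhile_cons_of_pos hs]
    · have hs' : PySem.Chars.isspace a = false := by simpa using hs
      rw [List.dropWhile_cons_of_neg (by simp [hs'])]
      by_cases had : a = '.'
      · subst had
        simp [List.splitOnP_cons]
      · rw [List.splitOnP_cons, show (a == '.') = false by simpa using had]
        simp only [Bool.false_eq_true, if_false, List.modifyHead_modifyHead]
        congr 1
        funext x
        exact (List.dropWhile_cons_of_neg (by simp [hs'])).symm

lemma collapse_splitOn (u : List Char) :
    (collapse u).splitOnP (· == '.') = (u.splitOnP (· == '.')).map collapse := by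
  induction u using collapse.induct with
  | case1 => simp [collapse]
  | case2 c t hs ih =>
    rw [collapse, if_pos hs]
    have hcd : (' ' == '.') = false := by decide
    have hcd2 : (c == '.') = false := by
      rw [beq_eq_false_iff_ne]; rintro rfl; simp [isspace_dot] at hs
    rw [List.splitOnP_cons, hcd]
    simp only [Bool.false_eq_true, if_false]
    rw [ih, splitOnP_dot_dropWhile, List.splitOnP_cons, hcd2]
    simp only [Bool.false_eq_true, if_false]
    rcases h : t.splitOnP (· == '.') with _ | ⟨s0, ls⟩
    · exact absurd h (List.splitOnP_ne_nil _ t)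
    · simp only [List.modifyHead_cons, List.map_cons]
      rw [show collapse (c :: s0) = ' ' :: collapse (s0.dropWhile PySem.Chars.isspace) from by
        rw [collapse, if_pos hs]]
  | case3 c t hs ih =>
    rw [collapse, if_neg (by simp [hs])]
    by_cases hd : c = '.'
    · subst hd
      rw [List.splitOnP_cons, List.splitOnP_cons]
      simp only [BEq.rfl, if_true, List.map_cons, ih]
      rw [show collapse [] = [] from by rw [collapse]]
    · have hcd : (c == '.') = false := by simpa using hd
      rw [List.splitOnP_cons, List.splitOnP_cons, hcd]
      simp only [Bool.false_eq_true, if_false, ih]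
      rcases h : t.splitOnP (· == '.') with _ | ⟨s0, ls⟩
      · exact absurd h (List.splitOnP_ne_nil _ t)
      · simp only [List.modifyHead_cons, List.map_cons]
        rw [show collapse (c :: s0) = c :: collapse s0 from by
          rw [collapse, if_neg (by simp [hs])]]

def Nn (u : List Char) : List Char := List.intercalate [' '] (Wwords u)

lemma ic_cons (w : List Char) (ws : List (List Char)) :
    List.intercalate [' '] (w :: ws) =
      w ++ (if ws = [] then [] else ' ' :: List.intercalate [' '] ws) := by
  rcases ws with _ | ⟨v, ws⟩
  · simp [List.intercalate]
  · simp only [List.intercalate, List.intersperse_cons₂, List.flatten_cons, if_neg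
      (by simp : ¬ (v :: ws : List (List Char)) = [])]
    simp

lemma Wwords_cons_space {a : Char} (ha : PySem.Chars.isspace a = true) (t : List Char) :
    Wwords (a :: t) = Wwords t := by
  rw [Wwords, List.splitOnP_cons, ha]
  simp [Wwords]

lemma Wwords_dropWhile (t : List Char) :
    Wwords (t.dropWhile PySem.Chars.isspace) = Wwords t := by
  induction t with
  | nil => rfl
  | cons a t ih =>
    by_cases ha : PySem.Chars.isspace a
    · rw [List.dropWhile_cons_of_pos ha, ih, Wwords_cons_space ha]
    · rw [List.dropWhile_cons_of_neg (by simpa using ha)]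

lemma Wwords_ne_nil_mem {t : List Char} {w : List Char} (h : w ∈ Wwords t) : w ≠ [] := by
  have := List.of_mem_filter h
  simpa using this

lemma Nn_eq_nil_iff (t : List Char) : Nn t = [] ↔ Wwords t = [] := by
  constructor
  · intro h
    rcases hw : Wwords t with _ | ⟨w, ws⟩
    · rfl
    · exfalso
      rw [Nn, hw, ic_cons] at h
      have hwne : w ≠ [] := Wwords_ne_nil_mem (by rw [hw]; exact List.mem_cons_self)
      rcases w with _ | _
      · exact hwne rfl
      · simp at h
  · intro h; rw [Nn, h]; rfl

lemma Nn_dropWhile (t : List Char) : Nn (t.dropWhile PySem.Chars.isspace) = Nn t := by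
  rw [Nn, Wwords_dropWhile, Nn]

lemma rstrip_cons (c : Char) (x : List Char) :
    PySem.Chars.rstrip (c :: x) =
      if PySem.Chars.rstrip x = [] then (if PySem.Chars.isspace c then [] else [c])
      else c :: PySem.Chars.rstrip x := by
  rw [PySem.Chars.rstrip, PySem.Chars.rstrip, List.reverse_cons, List.dropWhile_append]
  by_cases h : List.dropWhile PySem.Chars.isspace x.reverse = []
  · rw [h]
    simp only [List.isEmpty_nil, if_true, List.reverse_eq_nil_iff.mpr h, if_pos rfl]
    by_cases hc : PySem.Chars.isspace c
    · simp [List.dropWhile, hc]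
    · simp [List.dropWhile, hc]
  · have : (List.dropWhile PySem.Chars.isspace x.reverse).isEmpty = false := by
      simpa [List.isEmpty_iff] using h
    rw [this]
    simp only [Bool.false_eq_true, if_false, List.reverse_append]
    rw [if_neg (by simpa [List.reverse_eq_nil_iff] using h)]
    simp

lemma collapse_nil : collapse [] = [] := by rw [collapse]

lemma collapse_cons_space {c : Char} (hc : PySem.Chars.isspace c = true) (t : List Char) :
    collapse (c :: t) = ' ' :: collapse (t.dropWhile PySem.Chars.isspace) := by
  rw [collapse, if_pos hc]

lemma collapse_cons_nonspace {c : Char} (hc : PySem.Chars.isspace c = false) (t : List Char) :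
    collapse (c :: t) = c :: collapse t := by
  rw [collapse, if_neg (by simp [hc])]

lemma dropWhile_collapse_of_head {v : List Char}
    (hv : ∀ c, v.head? = some c → PySem.Chars.isspace c = false) :
    (collapse v).dropWhile PySem.Chars.isspace = collapse v := by
  rcases v with _ | ⟨c, t⟩
  · simp [collapse_nil]
  · rw [collapse_cons_nonspace (hv c rfl)]
    exact List.dropWhile_cons_of_neg (by simp [hv c rfl])

lemma lstrip_collapse (u : List Char) :
    PySem.Chars.lstrip (collapse u) = collapse (u.dropWhile PySem.Chars.isspace) := by
  rcases u with _ | ⟨c, t⟩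
  · simp [collapse_nil, PySem.Chars.lstrip]
  · by_cases hc : PySem.Chars.isspace c
    · rw [collapse_cons_space hc, PySem.Chars.lstrip, List.dropWhile_cons_of_pos (by decide),
        List.dropWhile_cons_of_pos hc]
      exact dropWhile_collapse_of_head (fun d hd => by
        have := List.head?_dropWhile_not PySem.Chars.isspace t
        rw [hd] at this
        simpa using this)
    · rw [collapse_cons_nonspace (by simpa using hc), PySem.Chars.lstrip,
        List.dropWhile_cons_of_neg (by simpa using hc),
        List.dropWhile_cons_of_neg (by simpa using hc),
        collapse_cons_nonspace (by simpa using hc)]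

lemma rstrip_nil : PySem.Chars.rstrip [] = [] := rfl

lemma Wwords_nil : Wwords [] = [] := rfl

lemma rstrip_collapse_aux : ∀ (n : Nat) (v : List Char), v.length ≤ n →
    (∀ c, v.head? = some c → PySem.Chars.isspace c = false) →
    PySem.Chars.rstrip (collapse v) = Nn v := by
  intro n
  induction n with
  | zero =>
    intro v hv _
    have : v = [] := List.length_eq_zero_iff.mp (Nat.le_zero.mp hv)
    subst this
    simp [collapse_nil, rstrip_nil, Nn, Wwords_nil, List.intercalate]
  | succ n ih =>
    intro v hv hhead
    rcases v with _ | ⟨c, t⟩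
    · simp [collapse_nil, rstrip_nil, Nn, Wwords_nil, List.intercalate]
    · have hc : PySem.Chars.isspace c = false := hhead c rfl
      rw [collapse_cons_nonspace hc, rstrip_cons]
      rcases t with _ | ⟨d, t'⟩
      · rw [collapse_nil, rstrip_nil, if_pos rfl, if_neg (by simp [hc])]
        simp [Nn, Wwords, List.splitOnP_cons, hc, List.intercalate]
      · by_cases hd : PySem.Chars.isspace d
        · -- t = d :: t' with d whitespace
          rw [collapse_cons_space hd, rstrip_cons]
          have hblank : (if PySem.Chars.isspace ' ' = true then ([] : List Char) else [' ']) = [] := by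
            decide
          rw [hblank]
          have hlen : (t'.dropWhile PySem.Chars.isspace).length ≤ n := by
            have := List.length_dropWhile_le PySem.Chars.isspace t'
            simp at hv; omega
          have hih : PySem.Chars.rstrip (collapse (t'.dropWhile PySem.Chars.isspace)) =
              Nn (t'.dropWhile PySem.Chars.isspace) :=
            ih _ hlen (fun e he => by
              have := List.head?_dropWhile_not PySem.Chars.isspace t'
              rw [he] at this; simpa using this)
          rw [hih, Nn_dropWhile]
          have hWdt : Wwords (d :: t') = Wwords t' := Wwords_cons_space hd t'
          have hWc : Wwords (c :: d :: t') = [c] :: Wwords t' := by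
            have hsplit : List.splitOnP PySem.Chars.isspace (d :: t') =
                [] :: List.splitOnP PySem.Chars.isspace t' := by
              rw [List.splitOnP_cons, hd]; simp
            rw [Wwords, List.splitOnP_cons, hc]
            simp only [Bool.false_eq_true, if_false, hsplit, List.modifyHead_cons]
            rw [List.filter_cons_of_pos (by simp)]
            rfl
          by_cases hNt : Nn t' = []
          · have hW : Wwords t' = [] := (Nn_eq_nil_iff _).mp hNt
            rw [hNt, if_pos rfl, if_pos rfl, if_neg (by simp [hc])]
            rw [Nn, hWc, hW]
            simp [List.intercalate]
          · rw [if_neg hNt, if_neg (by simp)]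
            have hrhs : Nn (c :: d :: t') = List.intercalate [' '] ([c] :: Wwords t') := by
              rw [Nn, hWc]
            rw [hrhs, ic_cons, if_neg (fun h => hNt ((Nn_eq_nil_iff _).mpr h))]
            simp [Nn]
        · -- t = d :: t' with d non-whitespace
          have hih : PySem.Chars.rstrip (collapse (d :: t')) = Nn (d :: t') :=
            ih _ (by simp at hv ⊢; omega) (fun e he => by
              simp at he; subst he; simpa using hd)
          rw [hih]
          have hWne : Wwords (d :: t') ≠ [] := by
            rw [Wwords, List.splitOnP_cons, show PySem.Chars.isspace d = false by simpa using hd]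
            simp only [Bool.false_eq_true, if_false]
            obtain ⟨ls, hls⟩ := splitOnP_head PySem.Chars.isspace t'
            rw [hls]
            simp
          rw [if_neg (fun h => hWne ((Nn_eq_nil_iff _).mp h))]
          -- goal: c :: Nn (d :: t') = Nn (c :: d :: t')
          obtain ⟨ls, hls⟩ := splitOnP_head PySem.Chars.isspace (d :: t')
          have htw : (d :: t').takeWhile (fun a => !PySem.Chars.isspace a) =
              d :: t'.takeWhile (fun a => !PySem.Chars.isspace a) :=
            List.takeWhile_cons_of_pos (by simpa using hd)
          rw [htw] at hls
          have hWc : Wwords (c :: d :: t') =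
              (c :: d :: t'.takeWhile (fun a => !PySem.Chars.isspace a)) :: ls.filter (· ≠ []) := by
            rw [Wwords, List.splitOnP_cons, hc]
            simp only [Bool.false_eq_true, if_false, hls, List.modifyHead_cons]
            rw [List.filter_cons_of_pos (by simp)]
          have hWt : Wwords (d :: t') =
              (d :: t'.takeWhile (fun a => !PySem.Chars.isspace a)) :: ls.filter (· ≠ []) := by
            rw [Wwords, hls, List.filter_cons_of_pos (by simp)]
          rw [Nn, Nn, hWc, hWt, ic_cons, ic_cons]
          simp

lemma strip_collapse (u : List Char) : PySem.Chars.strip (collapse u) = Nn u := by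
  rw [PySem.Chars.strip, lstrip_collapse]
  rw [rstrip_collapse_aux (u.dropWhile PySem.Chars.isspace).length _ le_rfl (fun e he => by
    have := List.head?_dropWhile_not PySem.Chars.isspace u
    rw [he] at this; simpa using this)]
  exact Nn_dropWhile u

lemma rstrip_append_space {a : Char} (ha : PySem.Chars.isspace a = true) (x : List Char) :
    PySem.Chars.rstrip (x ++ [a]) = PySem.Chars.rstrip x := by
  rw [PySem.Chars.rstrip, PySem.Chars.rstrip, List.reverse_append]
  simp [List.dropWhile_cons_of_pos ha]

lemma strip_append_space {a : Char} (ha : PySem.Chars.isspace a = true) (x : List Char) :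
    PySem.Chars.strip (x ++ [a]) = PySem.Chars.strip x := by
  rw [PySem.Chars.strip, PySem.Chars.strip, PySem.Chars.lstrip, PySem.Chars.lstrip,
    List.dropWhile_append]
  by_cases h : (List.dropWhile PySem.Chars.isspace x).isEmpty
  · rw [if_pos h]
    rw [List.isEmpty_iff] at h
    rw [h, List.dropWhile_cons_of_pos ha]
    simp
  · rw [if_neg h]
    exact rstrip_append_space ha _

lemma splitOnP_concat {p : Char → Bool} {a : Char} (ha : p a = false) (y : List Char) :
    ∃ Z z, y.splitOnP p = Z ++ [z] ∧ (y ++ [a]).splitOnP p = Z ++ [z ++ [a]] := by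
  induction y with
  | nil => exact ⟨[], [], by simp, by simp [List.splitOnP_cons, ha]⟩
  | cons c y' ih =>
    obtain ⟨Z, z, h1, h2⟩ := ih
    by_cases hc : p c
    · exact ⟨[] :: Z, z, by simp [List.splitOnP_cons, hc, h1],
        by simp [List.splitOnP_cons, hc, h2]⟩
    · rcases Z with _ | ⟨w, Zt⟩
      · refine ⟨[], c :: z, ?_, ?_⟩
        · simp only [List.cons_append, List.nil_append, List.splitOnP_cons, hc,
            Bool.false_eq_true, if_false, h1]
          simp
        · simp only [List.cons_append, List.splitOnP_cons, hc, Bool.false_eq_true, if_false, h2]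
          simp
      · refine ⟨(c :: w) :: Zt, z, ?_, ?_⟩
        · simp only [List.splitOnP_cons, hc, Bool.false_eq_true, if_false, h1]
          simp
        · simp only [List.cons_append, List.splitOnP_cons, hc, Bool.false_eq_true, if_false, h2]
          simp

lemma map_strip_split_concat_space {a : Char} (ha : PySem.Chars.isspace a = true) (y : List Char) :
    ((y ++ [a]).splitOnP (· == '.')).map PySem.Chars.strip =
      (y.splitOnP (· == '.')).map PySem.Chars.strip := by
  have had : (a == '.') = false := by
    rw [beq_eq_false_iff_ne]; rintro rfl; exact absurd ha (by decide)
  obtain ⟨Z, z, h1, h2⟩ := splitOnP_concat (p := (· == '.')) (a := a) had y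
  rw [h1, h2]
  simp [strip_append_space ha]

lemma map_strip_split_append_spaces (k : List Char) (hk : ∀ c ∈ k, PySem.Chars.isspace c = true) :
    ∀ y : List Char,
      ((y ++ k).splitOnP (· == '.')).map PySem.Chars.strip =
        (y.splitOnP (· == '.')).map PySem.Chars.strip := by
  induction k with
  | nil => intro y; simp
  | cons a k' ih =>
    intro y
    have : y ++ a :: k' = (y ++ [a]) ++ k' := by simp
    rw [this, ih (fun c hc => hk c (List.mem_cons_of_mem a hc)),
      map_strip_split_concat_space (hk a List.mem_cons_self)]

lemma rstrip_decomp (x : List Char) :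
    ∃ k, x = PySem.Chars.rstrip x ++ k ∧ ∀ c ∈ k, PySem.Chars.isspace c = true := by
  refine ⟨(x.reverse.takeWhile PySem.Chars.isspace).reverse, ?_, ?_⟩
  · rw [PySem.Chars.rstrip]
    rw [← List.reverse_append, List.takeWhile_append_dropWhile, List.reverse_reverse]
  · intro c hc
    rw [List.mem_reverse] at hc
    exact List.mem_takeWhile_imp hc

lemma dropWhile_idem (p : Char → Bool) (l : List Char) :
    (l.dropWhile p).dropWhile p = l.dropWhile p := by
  induction l with
  | nil => rfl
  | cons c t ih =>
    by_cases h : p c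
    · rw [List.dropWhile_cons_of_pos h, ih]
    · rw [List.dropWhile_cons_of_neg (by simpa using h), List.dropWhile_cons_of_neg (by simpa using h)]

lemma strip_dropWhile (x : List Char) :
    PySem.Chars.strip (x.dropWhile PySem.Chars.isspace) = PySem.Chars.strip x := by
  rw [PySem.Chars.strip, PySem.Chars.strip, PySem.Chars.lstrip, PySem.Chars.lstrip,
    dropWhile_idem]

lemma map_strip_split_strip (w : List Char) :
    ((PySem.Chars.strip w).splitOnP (· == '.')).map PySem.Chars.strip =
      (w.splitOnP (· == '.')).map PySem.Chars.strip := by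
  obtain ⟨k, hk1, hk2⟩ := rstrip_decomp (PySem.Chars.lstrip w)
  calc ((PySem.Chars.strip w).splitOnP (· == '.')).map PySem.Chars.strip
      = (((PySem.Chars.strip w ++ k)).splitOnP (· == '.')).map PySem.Chars.strip :=
        (map_strip_split_append_spaces k hk2 _).symm
    _ = ((PySem.Chars.lstrip w).splitOnP (· == '.')).map PySem.Chars.strip := by
        rw [PySem.Chars.strip, ← hk1]
    _ = (w.splitOnP (· == '.')).map PySem.Chars.strip := by
        rw [PySem.Chars.lstrip, splitOnP_dot_dropWhile]
        cases h : w.splitOnP (· == '.') with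
        | nil => simp
        | cons s0 ls => simp [strip_dropWhile]

lemma isIn_repF (w : List Char) :
    (if PySem.Chars.isIn ['i', 'e'] w then PySem.Chars.replace w ['i', 'e'] ['e', 'i'] else w) =
      repF w := by
  by_cases h : PySem.Chars.isIn ['i', 'e'] w
  · rw [if_pos h, replace_eq_repF]
  · rw [if_neg h, repF_of_not_infix]
    intro hinf
    exact h ((PySem.Chars.isIn_iff_infix _ _).mpr hinf)

lemma Wwords_repF (u : List Char) : (Wwords u).map repF = Wwords (repF u) := by
  rw [Wwords, Wwords, splitOnP_repF PySem.Chars.isspace (by decide) (by decide), List.filter_map]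
  congr 1
  apply List.filter_congr
  intro x _
  rcases x with _ | ⟨c, t⟩
  · simp [show repF [] = [] from rfl]
  · simp [repF_ne_nil (List.cons_ne_nil c t)]

lemma main_segments (u : List Char) :
    ((List.intercalate [' '] ((Wwords u).map repF)).splitOnP (· == '.')).map
        (fun item => pyCapitalize (PySem.Chars.strip item)) =
      (u.splitOnP (· == '.')).map (fun seg => pyCapitalize (Nn (repF seg))) := by
  have key : ((List.intercalate [' '] ((Wwords u).map repF)).splitOnP (· == '.')).map
      PySem.Chars.strip = (u.splitOnP (· == '.')).map (fun seg => Nn (repF seg)) := by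
    rw [Wwords_repF]
    have h1 : List.intercalate [' '] (Wwords (repF u)) = Nn (repF u) := rfl
    rw [h1, ← strip_collapse, map_strip_split_strip, collapse_splitOn,
      splitOnP_repF (· == '.') (by decide) (by decide)]
    rw [List.map_map, List.map_map]
    apply List.map_congr_left
    intro x _
    simp [Function.comp, strip_collapse]
  calc ((List.intercalate [' '] ((Wwords u).map repF)).splitOnP (· == '.')).map
        (fun item => pyCapitalize (PySem.Chars.strip item))
      = (((List.intercalate [' '] ((Wwords u).map repF)).splitOnP (· == '.')).map
          PySem.Chars.strip).map pyCapitalize := by rw [List.map_map]; rfl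
    _ = ((u.splitOnP (· == '.')).map (fun seg => Nn (repF seg))).map pyCapitalize := by rw [key]
    _ = (u.splitOnP (· == '.')).map (fun seg => pyCapitalize (Nn (repF seg))) := by
        rw [List.map_map]; rfl

set_option maxHeartbeats 1000000 in
theorem proofread_spec : Claim_equal_proofread := by
  intro s _
  unfold Spec_proofread proofread proofread_alt
  have hbody : (fun (result : List (List Char)) word =>
      if PySem.Chars.isIn ['i', 'e'] word then
        result ++ [PySem.Chars.replace word ['i', 'e'] ['e', 'i']]
      else result ++ [word]) = fun (result : List (List Char)) word => result ++ [repF word] := by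
    funext r w
    by_cases h : PySem.Chars.isIn ['i', 'e'] w
    · rw [if_pos h, ← isIn_repF w, if_pos h]
    · rw [if_neg h, ← isIn_repF w, if_neg h]
  rw [hbody]
  simp only [PySem.List.foldl_append_singleton_eq_map, List.nil_append]
  congr 1
  rw [PySem.Chars.join, PySem.Chars.join]
  congr 1
  rw [split₀_bridge, splitOn_bridge, splitOn_bridge]
  have hsplit : ∀ v : List Char, v.splitOn '.' = v.splitOnP (· == '.') := fun _ => rfl
  rw [hsplit, hsplit]
  have hB : (fun (sentence : List Char) => pyCapitalize (PySem.Chars.join [' ']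
      (PySem.Chars.split₀ (PySem.Chars.replace sentence ['i', 'e'] ['e', 'i'])))) =
      fun seg => pyCapitalize (Nn (repF seg)) := by
    funext seg
    rw [replace_eq_repF, split₀_bridge, PySem.Chars.join, Nn]
  rw [hB, PySem.Chars.join]
  exact congrArg _ (main_segments (PySem.Chars.lower s.toList))
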